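-- pv_equiv track=rewrite | github.com/FKatenbrink/Advent-of-Code | 2018/day13_1.py | collided
-- ===== SOURCE A (Python) =====
-- def collided(carts):
--     coords = set()
--     for cart in carts:
--         x, y, d, i = cart
--         c = (x, y)
--         if c in coords:
--             return c
--         else:
--             coords.add(c)
--
--     return None
-- ===== SOURCE B (Python) =====
-- def collided(carts):
--     # Sort-based duplicate detection: sort (x, y, i) triples lexicographically,
--     # scan adjacent pairs for equal coordinates, and return the coordinate whose
--     # second occurrence index i is smallest (= the first collision A reports).
--     keyed = sorted((x, y, i) for i, (x, y, _, _) in enumerate(carts))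
--     best = None
--     for p, q in zip(keyed, keyed[1:]):
--         if p[0] == q[0] and p[1] == q[1]:
--             if best is None or q[2] < best[2]:
--                 best = q
--     if best is None:
--         return None
--     return (best[0], best[1])
-- ===== Notes on version B (the rewrite author's own statement) =====
-- stated objective: alternative
-- what changed: Replaced the streaming seen-set scan with sort-based duplicate detection: sort (x, y, i) triples lexicographically, scan adjacent pairs for equal coordinates, and return the duplicate whose second-occurrence index is smallest.
import Mathlib
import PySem

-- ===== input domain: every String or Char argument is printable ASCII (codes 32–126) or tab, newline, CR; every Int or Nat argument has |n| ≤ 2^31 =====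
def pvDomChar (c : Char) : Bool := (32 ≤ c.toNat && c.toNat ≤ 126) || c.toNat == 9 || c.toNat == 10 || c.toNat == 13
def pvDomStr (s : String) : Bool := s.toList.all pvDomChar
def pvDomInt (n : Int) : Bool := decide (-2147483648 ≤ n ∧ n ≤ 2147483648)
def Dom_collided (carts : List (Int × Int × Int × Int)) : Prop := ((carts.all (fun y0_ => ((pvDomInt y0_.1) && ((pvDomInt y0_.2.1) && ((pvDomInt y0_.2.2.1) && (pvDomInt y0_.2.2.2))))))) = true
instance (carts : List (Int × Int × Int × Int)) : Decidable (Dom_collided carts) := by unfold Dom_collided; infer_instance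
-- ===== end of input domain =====

-- B replaces A's streaming 'seen'-set scan by sort-based duplicate detection:
-- sort (x, y, i) triples lexicographically, scan adjacent pairs for equal
-- coordinates and pick the smallest second-occurrence index (alternative algorithm).


-- ===== PORT A =====
-- loop 'for cart in carts' carrying the set 'coords'
def collidedGo : List (Int × Int × Int × Int) → PySem.Set (Int × Int) → Option (Int × Int)
  | [], _ => none
  | (x, y, _d, _i) :: rest, coords =>
    let c := (x, y)
    if PySem.Set.contains coords c then some c
    else collidedGo rest (PySem.Set.add coords c)

def collided (carts : List (Int × Int × Int × Int)) : Option (Int × Int) :=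
  collidedGo carts PySem.Set.empty

-- ===== PORT B =====
-- Python compares the (x, y, i) tuples lexicographically; the ×ₗ (Lex) order on the
-- packaged tuple is exactly that comparison, so 'sorted(triples)' is sorted by this key.
def pvKey (t : Int × Int × Int) : (Int ×ₗ Int) ×ₗ Int := toLex (toLex (t.1, t.2.1), t.2.2)

-- '((x, y, i) for i, (x, y, _, _) in enumerate(carts))'
def pvTriples (carts : List (Int × Int × Int × Int)) : List (Int × Int × Int) :=
  (PySem.List.enumerate carts 0).map (fun p => (p.2.1, p.2.2.1, p.1))

-- loop body: 'if p[0] == q[0] and p[1] == q[1]: if best is None or q[2] < best[2]: best = q'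
def pvStep (best : Option (Int × Int × Int)) (pq : (Int × Int × Int) × (Int × Int × Int)) :
    Option (Int × Int × Int) :=
  if pq.1.1 == pq.2.1 && pq.1.2.1 == pq.2.2.1 then
    match best with
    | none => some pq.2
    | some b => if pq.2.2.2 < b.2.2 then some pq.2 else best
  else best

def collided_alt (carts : List (Int × Int × Int × Int)) : Option (Int × Int) :=
  let keyed := PySem.List.sorted (pvTriples carts) pvKey
  let best := (keyed.zip (PySem.List.slice keyed (some 1))).foldl pvStep none
  match best with
  | none => none
  | some b => some (b.1, b.2.1)

-- ===== PRECONDITION & SPEC =====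
def Spec_collided (carts : List (Int × Int × Int × Int)) (out : Option (Int × Int)) : Prop :=
  out = collided_alt carts
instance (carts : List (Int × Int × Int × Int)) (out : Option (Int × Int)) :
    Decidable (Spec_collided carts out) := by unfold Spec_collided; infer_instance

-- ===== CLAIM =====
def Claim_equal_collided : Prop :=
  ∀ (carts : List (Int × Int × Int × Int)), Dom_collided carts → Spec_collided carts (collided carts)

-- ===== LEMMAS AND PROOFS =====
-- the coordinate list and the "index i repeats an earlier coordinate" predicate
def pvCS (carts : List (Int × Int × Int × Int)) : List (Int × Int) :=
  carts.map (fun q => (q.1, q.2.1))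

def pvP (cs : List (Int × Int)) (i : Nat) : Bool :=
  decide (cs.getD i (0, 0) ∈ cs.take i)

-- A's loop, rephrased over coordinate lists with the seen prefix as a list
def firstRep : List (Int × Int) → List (Int × Int) → Option (Int × Int)
  | [], _ => none
  | c :: r, pre => if c ∈ pre then some c else firstRep r (pre ++ [c])

theorem collidedGo_eq_firstRep (rest : List (Int × Int × Int × Int)) :
    ∀ pre : List (Int × Int),
      collidedGo rest (PySem.Set.ofList pre) = firstRep (pvCS rest) pre := by
  induction rest with
  | nil => intro pre; simp [collidedGo, pvCS, firstRep]
  | cons q rs ih =>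
    intro pre
    obtain ⟨x, y, dd, ii⟩ := q
    by_cases hm : (x, y) ∈ pre
    · simp [collidedGo, pvCS, firstRep, PySem.Set.contains, PySem.Set.mem_ofList, hm]
    · have hadd : PySem.Set.add (PySem.Set.ofList pre) (x, y) = PySem.Set.ofList (pre ++ [(x, y)]) := by
        simp [PySem.Set.ofList_eq_foldl, List.foldl_append]
      have hcontains : PySem.Set.contains (PySem.Set.ofList pre) (x, y) = false := by
        simp [PySem.Set.contains, PySem.Set.mem_ofList, hm]
      simp only [pvCS, List.map_cons, firstRep]
      rw [if_neg hm]
      simp only [collidedGo, hcontains, Bool.false_eq_true, if_false]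
      rw [hadd, ih]
      rfl

theorem firstRep_eq_find (r : List (Int × Int)) :
    ∀ pre : List (Int × Int),
      firstRep r pre =
        ((List.range' pre.length r.length).find? (pvP (pre ++ r))).map
          (fun i => (pre ++ r).getD i (0, 0)) := by
  induction r with
  | nil => intro pre; simp [firstRep]
  | cons c r' ih =>
    intro pre
    have hget : (pre ++ c :: r').getD pre.length (0, 0) = c := by
      simp [List.getD, List.getElem?_append_right]
    have htake : (pre ++ c :: r').take pre.length = pre := by
      simpa using List.take_left (l₁ := pre) (l₂ := c :: r')
    simp only [firstRep, List.length_cons, List.range'_succ, List.find?_cons, pvP, hget, htake]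
    by_cases hm : c ∈ pre
    · simp [hm, hget]
    · have h2 := ih (pre ++ [c])
      simp only [firstRep, List.append_assoc, List.singleton_append, List.length_append,
        List.length_cons, List.length_nil] at h2
      simp [hm, h2, pvP]

theorem collided_eq_find (carts : List (Int × Int × Int × Int)) :
    collided carts =
      ((List.range (pvCS carts).length).find? (pvP (pvCS carts))).map
        (fun i => (pvCS carts).getD i (0, 0)) := by
  have h1 : collided carts = firstRep (pvCS carts) [] := collidedGo_eq_firstRep carts []
  rw [h1, firstRep_eq_find, List.range_eq_range']
  rfl

-- find? on range n: the witness holds, is below n, and is the least index that holds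
theorem find_range_min {n : Nat} {p : Nat → Bool} {i : Nat}
    (h : (List.range n).find? p = some i) :
    p i = true ∧ i < n ∧ ∀ j, j < i → p j = false := by
  rw [List.find?_eq_some_iff_append] at h
  obtain ⟨hp, as, bs, heq, hall⟩ := h
  have hlen : as.length < n := by
    have hl := congrArg List.length heq
    simp at hl; omega
  have h1 : (List.range n)[as.length]? = some as.length := by
    simp [List.getElem?_range, hlen]
  rw [heq] at h1
  have h2 : (as ++ i :: bs)[as.length]? = some i := by
    rw [List.getElem?_append_right (le_refl _)]; simp
  rw [h2] at h1
  have hi : i = as.length := by simpa using h1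
  refine ⟨hp, by omega, ?_⟩
  intro j hj
  have hja : j < as.length := by omega
  have hjn : j < n := by omega
  have hjq : (List.range n)[j]? = some j := by simp [hjn]
  rw [heq, List.getElem?_append_left hja] at hjq
  have hjmem : j ∈ as := List.mem_of_getElem? hjq
  have := hall j hjmem
  simpa using this

-- unpacking the lexicographic key comparison
theorem pvKey_lt_iff (a b : Int × Int × Int) :
    pvKey a < pvKey b ↔
      (a.1 < b.1 ∨ (a.1 = b.1 ∧ a.2.1 < b.2.1)) ∨
        ((a.1 = b.1 ∧ a.2.1 = b.2.1) ∧ a.2.2 < b.2.2) := by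
  simp [pvKey, Prod.Lex.lt_iff, Prod.ext_iff]

theorem pvKey_snd_eq {a b : Int × Int × Int} (h : pvKey a = pvKey b) : a.2.2 = b.2.2 := by
  have := congrArg (fun z => (ofLex z).2) h
  simpa [pvKey] using this

-- membership in the triple list
theorem mem_pvTriples {carts : List (Int × Int × Int × Int)} {t : Int × Int × Int} :
    t ∈ pvTriples carts ↔
      ∃ k, ∃ h : k < (pvCS carts).length, t = ((pvCS carts)[k].1, (pvCS carts)[k].2, (k : Int)) := by
  constructor
  · intro ht
    simp only [pvTriples, List.mem_map] at ht
    obtain ⟨p, hp, rfl⟩ := ht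
    rw [PySem.List.mem_enumerate_iff] at hp
    obtain ⟨k, hk, rfl⟩ := hp
    exact ⟨k, by simpa [pvCS] using hk, by simp [pvCS]⟩
  · rintro ⟨k, hk, rfl⟩
    have hk' : k < carts.length := by simpa [pvCS] using hk
    simp only [pvTriples, List.mem_map]
    refine ⟨(((k : Int)), carts[k]), ?_, by simp [pvCS]⟩
    rw [PySem.List.mem_enumerate_iff]
    exact ⟨k, hk', by simp⟩

-- the sorted triple list is strictly increasing under the key
theorem keyed_pairwise (carts : List (Int × Int × Int × Int)) :
    (PySem.List.sorted (pvTriples carts) pvKey).Pairwise (fun a b => pvKey a < pvKey b) := by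
  have hle := PySem.List.sorted_pairwise (pvTriples carts) pvKey
  have hidx : (pvTriples carts).Pairwise (fun a b => a.2.2 ≠ b.2.2) := by
    have := PySem.List.pairwise_lt_enumerate carts 0
    have hmap : (pvTriples carts).Pairwise (fun a b => a.2.2 < b.2.2) := by
      unfold pvTriples
      rw [List.pairwise_map]
      exact this
    exact hmap.imp (fun h => ne_of_lt h)
  have hne : (PySem.List.sorted (pvTriples carts) pvKey).Pairwise (fun a b => a.2.2 ≠ b.2.2) := by
    have hsymm : ∀ {x y : Int × Int × Int}, x.2.2 ≠ y.2.2 → y.2.2 ≠ x.2.2 := fun h => h.symm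
    exact ((PySem.List.sorted_perm (pvTriples carts) pvKey false).pairwise_iff hsymm).mpr hidx
  refine (hle.and hne).imp ?_
  rintro a b ⟨h1, h2⟩
  exact lt_of_le_of_ne h1 (fun he => h2 (pvKey_snd_eq he))

-- adjacent pairs of a pairwise-ordered list are ordered
theorem mem_zip_rel {l : List (Int × Int × Int)}
    (hp : l.Pairwise (fun a b => pvKey a < pvKey b)) :
    ∀ pq ∈ l.zip (l.drop 1), pvKey pq.1 < pvKey pq.2 := by
  induction l with
  | nil => intro pq h; simp at h
  | cons x xs ih =>
    intro pq hpq
    rw [List.pairwise_cons] at hp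
    cases xs with
    | nil => simp at hpq
    | cons y ys =>
      simp only [List.drop_succ_cons, List.drop_zero, List.zip_cons_cons, List.mem_cons] at hpq
      rcases hpq with rfl | hpq
      · exact hp.1 y (by simp)
      · exact ih hp.2 pq (by simpa using hpq)

-- two members of a strictly ordered list with nothing strictly between them are adjacent
theorem adj_of_no_between {l : List (Int × Int × Int)} {a b : Int × Int × Int}
    (hp : l.Pairwise (fun a b => pvKey a < pvKey b))
    (ha : a ∈ l) (hb : b ∈ l) (hab : pvKey a < pvKey b)
    (hno : ∀ z ∈ l, ¬(pvKey a < pvKey z ∧ pvKey z < pvKey b)) :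
    (a, b) ∈ l.zip (l.drop 1) := by
  induction l with
  | nil => simp at ha
  | cons x xs ih =>
    rw [List.pairwise_cons] at hp
    rcases List.mem_cons.mp ha with rfl | hax
    · -- a is the head; b must be the head of xs
      have hbxs : b ∈ xs := by
        rcases List.mem_cons.mp hb with rfl | h
        · exact absurd hab (lt_irrefl _)
        · exact h
      cases xs with
      | nil => simp at hbxs
      | cons y ys =>
        rcases List.mem_cons.mp hbxs with rfl | hbys
        · simp
        · exfalso
          refine hno y (by simp) ⟨hp.1 y (by simp), ?_⟩
          exact (List.pairwise_cons.mp hp.2).1 b hbys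
    · -- a is in the tail, hence so is b
      have hbxs : b ∈ xs := by
        rcases List.mem_cons.mp hb with rfl | h
        · exact absurd (lt_trans (hp.1 a hax) hab) (lt_irrefl _)
        · exact h
      have hmem := ih hp.2 hax hbxs (fun z hz => hno z (List.mem_cons_of_mem x hz))
      cases xs with
      | nil => simp at hbxs
      | cons y ys =>
        simp only [List.drop_succ_cons, List.drop_zero, List.zip_cons_cons, List.mem_cons]
        right
        simpa using hmem

-- every candidate produced by the adjacent scan marks a repeated index
theorem cand_spec {carts : List (Int × Int × Int × Int)}
    {pq : (Int × Int × Int) × (Int × Int × Int)}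
    (hz : pq ∈ (PySem.List.sorted (pvTriples carts) pvKey).zip
        ((PySem.List.sorted (pvTriples carts) pvKey).drop 1))
    (hc : (pq.1.1 == pq.2.1 && pq.1.2.1 == pq.2.2.1) = true) :
    ∃ k, ∃ h : k < (pvCS carts).length,
      pq.2 = ((pvCS carts)[k].1, (pvCS carts)[k].2, (k : Int)) ∧ pvP (pvCS carts) k = true := by
  have h1 : pq.1 ∈ PySem.List.sorted (pvTriples carts) pvKey := (List.of_mem_zip hz).1
  have h2 : pq.2 ∈ PySem.List.sorted (pvTriples carts) pvKey :=
    List.mem_of_mem_drop (List.of_mem_zip hz).2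
  rw [PySem.List.mem_sorted, mem_pvTriples] at h1 h2
  obtain ⟨k1, hk1, he1⟩ := h1
  obtain ⟨k2, hk2, he2⟩ := h2
  have hlt := mem_zip_rel (keyed_pairwise carts) pq hz
  simp only [Bool.and_eq_true, beq_iff_eq] at hc
  have hco1 : pq.1.1 = pq.2.1 := hc.1
  have hco2 : pq.1.2.1 = pq.2.2.1 := hc.2
  have hi : pq.1.2.2 < pq.2.2.2 := by
    rcases (pvKey_lt_iff pq.1 pq.2).mp hlt with (h | h) | h
    · omega
    · omega
    · exact h.2
  refine ⟨k2, hk2, he2, ?_⟩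
  unfold pvP
  have hk12 : k1 < k2 := by
    have : (k1 : Int) < (k2 : Int) := by rw [he1, he2] at hi; simpa using hi
    exact_mod_cast this
  have hcseq : (pvCS carts)[k1] = (pvCS carts)[k2] := by
    have e1 : (pvCS carts)[k1].1 = (pvCS carts)[k2].1 := by
      have := hco1; rw [he1, he2] at this; exact this
    have e2 : (pvCS carts)[k1].2 = (pvCS carts)[k2].2 := by
      have := hco2; rw [he1, he2] at this; exact this
    exact Prod.ext e1 e2
  have hmem : (pvCS carts).getD k2 (0, 0) ∈ (pvCS carts).take k2 := by
    rw [List.getD_eq_getElem _ _ hk2]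
    rw [List.mem_iff_getElem]
    refine ⟨k1, by simp [hk12, hk1], ?_⟩
    rw [List.getElem_take]
    exact hcseq
  simpa using hmem

-- the update step of B's loop, with the coordinate test factored out
def pvUpd (best : Option (Int × Int × Int)) (pq : (Int × Int × Int) × (Int × Int × Int)) :
    Option (Int × Int × Int) :=
  match best with
  | none => some pq.2
  | some b => if pq.2.2.2 < b.2.2 then some pq.2 else some b

theorem pvStep_eq : pvStep = fun best pq =>
    if (pq.1.1 == pq.2.1 && pq.1.2.1 == pq.2.2.1) = true then pvUpd best pq else best := by
  funext best pq
  unfold pvStep pvUpd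
  cases best <;> split <;> simp

-- properties of the min-selection fold
theorem fold_mem (M : List ((Int × Int × Int) × (Int × Int × Int))) :
    ∀ (acc : Option (Int × Int × Int)) (b : Int × Int × Int),
      M.foldl pvUpd acc = some b →
      acc = some b ∨ ∃ pq ∈ M, b = pq.2 := by
  induction M with
  | nil => intro acc b h; exact Or.inl h
  | cons pq M' ih =>
    intro acc b h
    simp only [List.foldl_cons] at h
    rcases ih _ b h with h' | ⟨pq', hpq', rfl⟩
    · cases acc with
      | none => simp [pvUpd] at h'; exact Or.inr ⟨pq, by simp, h'.symm⟩
      | some a =>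
        simp only [pvUpd] at h'
        split at h'
        · simp at h'; exact Or.inr ⟨pq, by simp, h'.symm⟩
        · simp at h'; exact Or.inl (by rw [h'])
    · exact Or.inr ⟨pq', by simp [hpq'], rfl⟩

theorem fold_isSome (M : List ((Int × Int × Int) × (Int × Int × Int))) (b : Int × Int × Int) :
    M.foldl pvUpd (some b) ≠ none := by
  induction M generalizing b with
  | nil => simp
  | cons pq M' ih =>
    simp only [List.foldl_cons, pvUpd]
    split <;> apply ih

theorem fold_min (M : List ((Int × Int × Int) × (Int × Int × Int))) :
    ∀ (acc : Option (Int × Int × Int)) (b : Int × Int × Int),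
      M.foldl pvUpd acc = some b →
      (∀ x, acc = some x → b.2.2 ≤ x.2.2) ∧ (∀ pq ∈ M, b.2.2 ≤ pq.2.2.2) := by
  induction M with
  | nil =>
    intro acc b h
    refine ⟨fun x hx => ?_, by simp⟩
    simp only [List.foldl_nil] at h
    rw [h] at hx
    cases hx
    exact le_refl _
  | cons pq M' ih =>
    intro acc b h
    simp only [List.foldl_cons] at h
    have step : ∀ x, pvUpd acc pq = some x →
        x.2.2 ≤ pq.2.2.2 ∧ ∀ y, acc = some y → x.2.2 ≤ y.2.2 := by
      intro x hx
      cases acc with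
      | none => simp [pvUpd] at hx; subst hx; exact ⟨le_refl _, by simp⟩
      | some a =>
        simp only [pvUpd] at hx
        split at hx <;> simp_all <;> omega
    obtain ⟨hacc', hrest⟩ := ih _ b h
    have hsome : ∃ x, pvUpd acc pq = some x := by
      cases acc with
      | none => exact ⟨pq.2, rfl⟩
      | some a =>
        simp only [pvUpd]
        split
        · exact ⟨pq.2, rfl⟩
        · exact ⟨a, rfl⟩
    obtain ⟨x, hx⟩ := hsome
    obtain ⟨hx1, hx2⟩ := step x hx
    have hbx : b.2.2 ≤ x.2.2 := hacc' x hx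
    constructor
    · intro y hy
      exact le_trans hbx (hx2 y hy)
    · intro pq' hpq'
      rcases List.mem_cons.mp hpq' with rfl | h'
      · exact le_trans hbx hx1
      · exact hrest pq' h'

-- rewrite B as: filter the adjacent equal-coordinate pairs, then min-select
theorem collided_alt_eq (carts : List (Int × Int × Int × Int)) :
    collided_alt carts =
      match (((PySem.List.sorted (pvTriples carts) pvKey).zip
            ((PySem.List.sorted (pvTriples carts) pvKey).drop 1)).filter
            (fun pq => pq.1.1 == pq.2.1 && pq.1.2.1 == pq.2.2.1)).foldl pvUpd none with
      | none => none
      | some b => some (b.1, b.2.1) := by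
  simp only [collided_alt]
  have hslice : PySem.List.slice (PySem.List.sorted (pvTriples carts) pvKey) (some 1) =
      (PySem.List.sorted (pvTriples carts) pvKey).drop 1 := by
    simpa using PySem.List.slice_from (PySem.List.sorted (pvTriples carts) pvKey) (a := 1) (by omega)
  rw [hslice, pvStep_eq, PySem.List.foldl_if_eq_foldl_filter]

-- the main equivalence
theorem collided_eq_alt (carts : List (Int × Int × Int × Int)) :
    collided carts = collided_alt carts := by
  rw [collided_eq_find, collided_alt_eq]
  set cs := pvCS carts with hcs
  set keyed := PySem.List.sorted (pvTriples carts) pvKey with hkeyed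
  set M := ((keyed.zip (keyed.drop 1)).filter
      (fun pq => pq.1.1 == pq.2.1 && pq.1.2.1 == pq.2.2.1)) with hM
  cases hfind : (List.range cs.length).find? (pvP cs) with
  | none =>
    -- no repeated index: no candidate survives the filter, so B's fold is empty
    have hnone : M = [] := by
      rw [List.eq_nil_iff_forall_not_mem]
      intro pq hpq
      rw [hM, List.mem_filter] at hpq
      obtain ⟨k, hk, _, hP⟩ := cand_spec hpq.1 hpq.2
      have hnp := List.find?_eq_none.mp hfind k (List.mem_range.mpr hk)
      exact absurd hP (by simpa using hnp)
    rw [hnone]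
    rfl
  | some i =>
    obtain ⟨hPi, hin, hmin⟩ := find_range_min hfind
    -- the repeated coordinate and its earlier occurrence
    have hPi' : cs.getD i (0, 0) ∈ cs.take i := by simpa [pvP] using hPi
    rw [List.getD_eq_getElem _ _ hin] at hPi'
    obtain ⟨j, hj, hjv⟩ := List.mem_iff_getElem.mp hPi'
    have hj2 : j < i ∧ j < cs.length := by simpa using hj
    have hji : j < i := hj2.1
    have hjn : j < cs.length := hj2.2
    rw [List.getElem_take] at hjv
    -- the two adjacent triples
    set t0 : Int × Int × Int := (cs[j].1, cs[j].2, (j : Int)) with ht0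
    set t1 : Int × Int × Int := (cs[i].1, cs[i].2, (i : Int)) with ht1
    have ht0m : t0 ∈ keyed := by
      rw [hkeyed, PySem.List.mem_sorted, mem_pvTriples]; exact ⟨j, hjn, rfl⟩
    have ht1m : t1 ∈ keyed := by
      rw [hkeyed, PySem.List.mem_sorted, mem_pvTriples]; exact ⟨i, hin, rfl⟩
    have hc01 : cs[j] = cs[i] := hjv
    have hlt01 : pvKey t0 < pvKey t1 := by
      rw [pvKey_lt_iff]
      right
      refine ⟨⟨by rw [ht0, ht1, hc01], by rw [ht0, ht1, hc01]⟩, ?_⟩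
      show (j : Int) < (i : Int)
      exact_mod_cast hji
    have hno : ∀ z ∈ keyed, ¬(pvKey t0 < pvKey z ∧ pvKey z < pvKey t1) := by
      intro z hz ⟨hz1, hz2⟩
      rw [hkeyed, PySem.List.mem_sorted, mem_pvTriples] at hz
      obtain ⟨kz, hkz, rfl⟩ := hz
      rw [pvKey_lt_iff] at hz1 hz2
      simp only [ht0, ht1] at hz1 hz2
      rw [hc01] at hz1
      -- from the two lex comparisons: coordinates all equal and j < kz < i
      have hx : cs[kz].1 = cs[i].1 ∧ cs[kz].2 = cs[i].2 ∧ (j:Int) < (kz:Int) ∧ (kz:Int) < (i:Int) := by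
        rcases hz1 with (h1 | ⟨h1a, h1b⟩) | ⟨⟨h1a, h1b⟩, h1c⟩ <;>
          rcases hz2 with (h2 | ⟨h2a, h2b⟩) | ⟨⟨h2a, h2b⟩, h2c⟩ <;>
          exact ⟨by omega, by omega, by omega, by omega⟩
      obtain ⟨hxe, hye, hjkz, hkzi⟩ := hx
      have hkzi' : kz < i := by exact_mod_cast hkzi
      have hjkz' : j < kz := by exact_mod_cast hjkz
      have hPkz : pvP cs kz = true := by
        unfold pvP
        rw [List.getD_eq_getElem _ _ hkz]
        have : cs[kz] = cs[i] := Prod.ext hxe hye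
        rw [decide_eq_true_iff, List.mem_iff_getElem]
        refine ⟨j, by simp [hjkz', hjn], ?_⟩
        rw [List.getElem_take, hjv]
        exact this.symm
      have := hmin kz hkzi'
      rw [hPkz] at this
      simp at this
    have hadj := adj_of_no_between (keyed_pairwise carts) ht0m ht1m hlt01 hno
    have hcand : (t0, t1) ∈ M := by
      rw [hM, List.mem_filter]
      refine ⟨hadj, ?_⟩
      simp [ht0, ht1, hc01]
    -- the fold returns some b; identify b with t1
    cases hfold : M.foldl pvUpd none with
    | none =>
      exfalso
      cases hMc : M with
      | nil => rw [hMc] at hcand; simp at hcand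
      | cons pq0 M' =>
        rw [hMc] at hfold
        simp only [List.foldl_cons] at hfold
        exact fold_isSome M' pq0.2 hfold
    | some b =>
      rcases fold_mem M none b hfold with h | ⟨pq, hpq, rfl⟩
      · simp at h
      · rw [hM, List.mem_filter] at hpq
        obtain ⟨kb, hkb, hbe, hPkb⟩ := cand_spec hpq.1 hpq.2
        -- minimality both ways gives kb = i
        have h1 : (pq.2).2.2 ≤ (i : Int) := by
          have := (fold_min M none _ hfold).2 (t0, t1) hcand
          simpa [ht1] using this
        have h2 : i ≤ kb := by
          by_contra hcon
          have := hmin kb (by omega)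
          rw [hPkb] at this
          simp at this
        have hkbi : kb = i := by
          rw [hbe] at h1
          simp only at h1
          have : (kb : Int) ≤ (i : Int) := h1
          omega
        subst hkbi
        rw [hbe]
        simp only [Option.map_some]
        rw [List.getD_eq_getElem _ _ hkb]

-- ===== VERDICT =====
theorem collided_spec : Claim_equal_collided := by
  intro carts _
  show collided carts = collided_alt carts
  exact collided_eq_alt carts
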